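-- pv_equiv track=rewrite | github.com/alimustafa0/-ai_learning_platform | courses/gamification.py | get_level_progress
-- ===== SOURCE A (Python) =====
-- LEVELS = [
--     (1, "Beginner", 0),
--     (2, "Learner", 50),
--     (3, "Explorer", 120),
--     (4, "Builder", 250),
--     (5, "Professional", 500),
--     (6, "Expert", 900),
--     (7, "Master", 1500),
-- ]
--
-- def get_level_progress(total_xp):
--     current_level = LEVELS[0]
--     next_level = None
--
--     for i, level in enumerate(LEVELS):
--         if total_xp >= level[2]:
--             current_level = level
--             if i + 1 < len(LEVELS):
--                 next_level = LEVELS[i + 1]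
--         else:
--             break
--
--     return current_level, next_level
-- ===== SOURCE B (Python) =====
-- LEVELS = [
--     (1, "Beginner", 0),
--     (2, "Learner", 50),
--     (3, "Explorer", 120),
--     (4, "Builder", 250),
--     (5, "Professional", 500),
--     (6, "Expert", 900),
--     (7, "Master", 1500),
-- ]
--
-- def get_level_progress(total_xp):
--     # Walk the table top-down: the first level whose threshold is met is the
--     # current one, and the previously visited (higher) level is the next one,
--     # capped at the top level itself.
--     nxt = LEVELS[-1]
--     for level in reversed(LEVELS):
--         if total_xp >= level[2]:
--             return level, nxt
--         nxt = level
--     return LEVELS[0], None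
-- ===== Notes on version B (the rewrite author's own statement) =====
-- stated objective: simpler
-- what changed: Replaces the forward enumerate/break scan with index bookkeeping and two accumulators by a reverse traversal with early return: walking the level table top-down, the previously visited level (capped at the top level) IS the next level, so the enumerate index arithmetic and the current-level accumulator disappear.
import Mathlib
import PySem

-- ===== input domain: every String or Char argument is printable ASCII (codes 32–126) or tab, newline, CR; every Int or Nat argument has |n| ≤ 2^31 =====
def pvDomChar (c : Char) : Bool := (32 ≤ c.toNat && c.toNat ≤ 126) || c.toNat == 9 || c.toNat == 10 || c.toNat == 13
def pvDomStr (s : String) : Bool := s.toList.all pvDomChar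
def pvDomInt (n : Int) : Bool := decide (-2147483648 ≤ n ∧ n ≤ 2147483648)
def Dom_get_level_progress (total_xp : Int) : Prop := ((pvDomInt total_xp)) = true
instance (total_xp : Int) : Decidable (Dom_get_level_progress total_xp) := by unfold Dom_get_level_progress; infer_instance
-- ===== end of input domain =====

-- B replaces A's forward enumerate/break scan (index bookkeeping, two accumulators) by a
-- reverse traversal with early return: the previously visited (higher) level, capped at the
-- top level, is the next level. Same values everywhere; objective: simpler.

-- ===== PORT A =====
def LEVELS : List (Int × String × Int) :=
  [(1, "Beginner", 0), (2, "Learner", 50), (3, "Explorer", 120), (4, "Builder", 250),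
   (5, "Professional", 500), (6, "Expert", 900), (7, "Master", 1500)]

-- the 'for i, level in enumerate(LEVELS): … else: break' loop, carrying (current_level, next_level)
def goA (total_xp : Int) :
    List (Int × (Int × String × Int)) → (Int × String × Int) → Option (Int × String × Int) →
    ((Int × String × Int) × Option (Int × String × Int))
  | [], curr, nxt => (curr, nxt)
  | (i, level) :: rest, curr, nxt =>
    if total_xp ≥ level.2.2 then
      goA total_xp rest level
        (if i + 1 < (LEVELS.length : Int) then PySem.List.pyGet? LEVELS (i + 1) else nxt)
    else (curr, nxt)

def get_level_progress (total_xp : Int) :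
    (Option (Int × String × Int)) × (Option (Int × String × Int)) :=
  let r := goA total_xp (PySem.List.enumerate LEVELS) (1, "Beginner", 0) none
  (some r.1, r.2)

-- ===== PORT B =====
-- the 'for level in reversed(LEVELS): …' loop with early return, carrying nxt
def goB (total_xp : Int) :
    List (Int × String × Int) → Option (Int × String × Int) →
    (Option (Int × String × Int)) × (Option (Int × String × Int))
  | [], _ => (PySem.List.pyGet? LEVELS 0, none)
  | level :: rest, nxt =>
    if total_xp ≥ level.2.2 then (some level, nxt) else goB total_xp rest (some level)

def get_level_progress_alt (total_xp : Int) :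
    (Option (Int × String × Int)) × (Option (Int × String × Int)) :=
  goB total_xp LEVELS.reverse (PySem.List.pyGet? LEVELS (-1))

-- ===== PRECONDITION & SPEC =====
def Spec_get_level_progress (total_xp : Int) (out : (Option (Int × String × Int)) × (Option (Int × String × Int))) : Prop := out = get_level_progress_alt total_xp
instance (total_xp : Int) (out : (Option (Int × String × Int)) × (Option (Int × String × Int))) : Decidable (Spec_get_level_progress total_xp out) := by unfold Spec_get_level_progress; infer_instance

-- ===== CLAIM (what is proved, stated in full; the proofs are below) =====
def Claim_equal_get_level_progress : Prop := ∀ (total_xp : Int), Dom_get_level_progress total_xp → Spec_get_level_progress total_xp (get_level_progress total_xp)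

-- ===== LEMMAS AND PROOFS =====

-- proof-only helper: the literal value of enumerate(LEVELS)
def pvEnumLit : List (Int × (Int × String × Int)) :=
  [(0,(1,"Beginner",0)),(1,(2,"Learner",50)),(2,(3,"Explorer",120)),(3,(4,"Builder",250)),
   (4,(5,"Professional",500)),(5,(6,"Expert",900)),(6,(7,"Master",1500))]

-- ===== VERDICT (by name: the statement is the Claim_ definition above) =====
theorem get_level_progress_spec : Claim_equal_get_level_progress := by
  intro x _
  unfold Spec_get_level_progress
  have hE : PySem.List.enumerate LEVELS = pvEnumLit := by decide
  have hR : LEVELS.reverse = [(7, "Master", 1500), (6, "Expert", 900), (5, "Professional", 500),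
      (4, "Builder", 250), (3, "Explorer", 120), (2, "Learner", 50), (1, "Beginner", 0)] := by decide
  simp only [get_level_progress, get_level_progress_alt]
  rw [hE, hR]
  obtain h | h | h | h | h | h | h | h :
      x < 0 ∨ (0 ≤ x ∧ x < 50) ∨ (50 ≤ x ∧ x < 120) ∨ (120 ≤ x ∧ x < 250) ∨ (250 ≤ x ∧ x < 500) ∨ (500 ≤ x ∧ x < 900) ∨ (900 ≤ x ∧ x < 1500) ∨ 1500 ≤ x := by omega
  · simp [goA, goB, pvEnumLit, LEVELS, PySem.List.pyGet?, PySem.List.pyIdx?, show ¬((0:Int) ≤ x) from by omega, show ¬((50:Int) ≤ x) from by omega, show ¬((120:Int) ≤ x) from by omega, show ¬((250:Int) ≤ x) from by omega, show ¬((500:Int) ≤ x) from by omega, show ¬((900:Int) ≤ x) from by omega, show ¬((1500:Int) ≤ x) from by omega]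
  · simp [goA, goB, pvEnumLit, LEVELS, PySem.List.pyGet?, PySem.List.pyIdx?, show (0:Int) ≤ x from by omega, show ¬((50:Int) ≤ x) from by omega, show ¬((120:Int) ≤ x) from by omega, show ¬((250:Int) ≤ x) from by omega, show ¬((500:Int) ≤ x) from by omega, show ¬((900:Int) ≤ x) from by omega, show ¬((1500:Int) ≤ x) from by omega]
  · simp [goA, goB, pvEnumLit, LEVELS, PySem.List.pyGet?, PySem.List.pyIdx?, show (0:Int) ≤ x from by omega, show (50:Int) ≤ x from by omega, show ¬((120:Int) ≤ x) from by omega, show ¬((250:Int) ≤ x) from by omega, show ¬((500:Int) ≤ x) from by omega, show ¬((900:Int) ≤ x) from by omega, show ¬((1500:Int) ≤ x) from by omega]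
  · simp [goA, goB, pvEnumLit, LEVELS, PySem.List.pyGet?, PySem.List.pyIdx?, show (0:Int) ≤ x from by omega, show (50:Int) ≤ x from by omega, show (120:Int) ≤ x from by omega, show ¬((250:Int) ≤ x) from by omega, show ¬((500:Int) ≤ x) from by omega, show ¬((900:Int) ≤ x) from by omega, show ¬((1500:Int) ≤ x) from by omega]
  · simp [goA, goB, pvEnumLit, LEVELS, PySem.List.pyGet?, PySem.List.pyIdx?, show (0:Int) ≤ x from by omega, show (50:Int) ≤ x from by omega, show (120:Int) ≤ x from by omega, show (250:Int) ≤ x from by omega, show ¬((500:Int) ≤ x) from by omega, show ¬((900:Int) ≤ x) from by omega, show ¬((1500:Int) ≤ x) from by omega]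
  · simp [goA, goB, pvEnumLit, LEVELS, PySem.List.pyGet?, PySem.List.pyIdx?, show (0:Int) ≤ x from by omega, show (50:Int) ≤ x from by omega, show (120:Int) ≤ x from by omega, show (250:Int) ≤ x from by omega, show (500:Int) ≤ x from by omega, show ¬((900:Int) ≤ x) from by omega, show ¬((1500:Int) ≤ x) from by omega]
  · simp [goA, goB, pvEnumLit, LEVELS, PySem.List.pyGet?, PySem.List.pyIdx?, show (0:Int) ≤ x from by omega, show (50:Int) ≤ x from by omega, show (120:Int) ≤ x from by omega, show (250:Int) ≤ x from by omega, show (500:Int) ≤ x from by omega, show (900:Int) ≤ x from by omega, show ¬((1500:Int) ≤ x) from by omega]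
  · simp [goA, goB, pvEnumLit, LEVELS, PySem.List.pyGet?, PySem.List.pyIdx?, show (0:Int) ≤ x from by omega, show (50:Int) ≤ x from by omega, show (120:Int) ≤ x from by omega, show (250:Int) ≤ x from by omega, show (500:Int) ≤ x from by omega, show (900:Int) ≤ x from by omega, show (1500:Int) ≤ x from by omega]
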